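-- pv_equiv track=rewrite | github.com/LeeroyChangkins/ruck-item-categorization-v2 | step-2-bigram-keyword-matching/2_3_interactive_keyword_match.py | tokenize_alpha_preserve
-- ===== SOURCE A (Python) =====
-- from typing import Any, Dict, List, Set, Tuple
--
-- def tokenize_alpha_preserve(text: str) -> List[str]:
--     if not text:
--         return []
--     s = str(text)
--     out: List[str] = []
--     cur: List[str] = []
--     for ch in s:
--         o = ord(ch)
--         if (65 <= o <= 90) or (97 <= o <= 122):
--             cur.append(ch)
--         else:
--             if cur:
--                 out.append("".join(cur))
--                 cur = []
--     if cur: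
--         out.append("".join(cur))
--     return out
-- ===== SOURCE B (Python) =====
-- import re
-- from typing import List
--
-- _ALPHA_RUN = re.compile(r'[A-Za-z]+')
--
-- def tokenize_alpha_preserve(text: str) -> List[str]:
--     if not text:
--         return []
--     return _ALPHA_RUN.findall(str(text))
-- ===== Notes on version B (the rewrite author's own statement) =====
-- stated objective: idiomatic
-- what changed: Replaces the explicit per-character loop with cur-accumulator/flush state machine by a single re.findall of the pattern [A-Za-z]+, which extracts every maximal ASCII-letter run in one C-level regex pass.
import Mathlib
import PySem

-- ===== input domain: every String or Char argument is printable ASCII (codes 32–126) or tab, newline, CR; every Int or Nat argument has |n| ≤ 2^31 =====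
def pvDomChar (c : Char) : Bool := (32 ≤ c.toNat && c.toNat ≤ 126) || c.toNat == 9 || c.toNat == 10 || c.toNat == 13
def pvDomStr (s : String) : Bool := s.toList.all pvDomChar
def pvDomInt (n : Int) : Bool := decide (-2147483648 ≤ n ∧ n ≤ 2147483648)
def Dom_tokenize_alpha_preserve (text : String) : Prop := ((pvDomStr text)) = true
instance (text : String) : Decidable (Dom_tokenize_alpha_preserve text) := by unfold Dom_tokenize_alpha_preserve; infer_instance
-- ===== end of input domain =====

-- B replaces A's explicit cur-accumulator/flush state machine by a regex-style
-- extraction of maximal ASCII-letter runs (re.findall(r'[A-Za-z]+')); return values only.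
-- ===== PORT A =====
-- ord-range test from A: (65 <= o <= 90) or (97 <= o <= 122)
def pvAIsAlpha (ch : Char) : Bool :=
  let o := ch.toNat
  (65 ≤ o && o ≤ 90) || (97 ≤ o && o ≤ 122)

def tokenize_alpha_preserve (text : String) : List String :=
  if text = "" then []          -- `if not text: return []`
  else
    -- for ch in s: accumulate into cur, flush to out on non-letters
    let st := text.toList.foldl
      (fun (st : List String × List Char) ch =>
        if pvAIsAlpha ch then (st.1, st.2 ++ [ch])
        else if st.2 ≠ [] then (st.1 ++ [String.ofList st.2], []) else st)
      ([], [])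
    if st.2 ≠ [] then st.1 ++ [String.ofList st.2] else st.1

-- ===== PORT B =====
def pvBIsAlpha (ch : Char) : Bool :=
  ('A' ≤ ch && ch ≤ 'Z') || ('a' ≤ ch && ch ≤ 'z')   -- the character class [A-Za-z]

-- exact model of re.findall(r'[A-Za-z]+'): scan for the next letter, emit the
-- maximal letter run starting there, continue after it
def pvFindAlphaRuns : List Char → List String
  | [] => []
  | c :: cs =>
    if h : pvBIsAlpha c then
      String.ofList ((c :: cs).takeWhile pvBIsAlpha)
        :: pvFindAlphaRuns ((c :: cs).dropWhile pvBIsAlpha)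
    else
      pvFindAlphaRuns cs
termination_by l => l.length
decreasing_by
  · simp only [List.dropWhile_cons, h, if_true]
    exact Nat.lt_succ_of_le (List.length_dropWhile_le _ _)
  · simp

def tokenize_alpha_preserve_alt (text : String) : List String :=
  if text = "" then [] else pvFindAlphaRuns text.toList
-- ===== PRECONDITION & SPEC =====
def Spec_tokenize_alpha_preserve (text : String) (out : List String) : Prop := out = tokenize_alpha_preserve_alt text
instance (text : String) (out : List String) : Decidable (Spec_tokenize_alpha_preserve text out) := by unfold Spec_tokenize_alpha_preserve; infer_instance

-- ===== CLAIM (what is proved, stated in full; the proofs are below) =====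
def Claim_equal_tokenize_alpha_preserve : Prop := ∀ (text : String), Dom_tokenize_alpha_preserve text → Spec_tokenize_alpha_preserve text (tokenize_alpha_preserve text)

-- ===== LEMMAS AND PROOFS =====

theorem pvIsAlpha_eq (c : Char) : pvAIsAlpha c = pvBIsAlpha c := by
  simp only [pvAIsAlpha, pvBIsAlpha, Char.le_def, UInt32.le_iff_toNat_le]
  rfl

theorem pvLoop_eq (cs : List Char) : ∀ (out : List String) (cur : List Char),
    (let st := cs.foldl
      (fun (st : List String × List Char) ch =>
        if pvAIsAlpha ch then (st.1, st.2 ++ [ch])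
        else if st.2 ≠ [] then (st.1 ++ [String.ofList st.2], []) else st)
      (out, cur)
     if st.2 ≠ [] then st.1 ++ [String.ofList st.2] else st.1)
    = out ++ (if cur = [] then pvFindAlphaRuns cs
              else String.ofList (cur ++ cs.takeWhile pvBIsAlpha)
                     :: pvFindAlphaRuns (cs.dropWhile pvBIsAlpha)) := by
  induction cs with
  | nil =>
    intro out cur
    by_cases h : cur = [] <;> simp [h, pvFindAlphaRuns]
  | cons c cs ih =>
    intro out cur
    rw [show ((c :: cs).foldl
        (fun (st : List String × List Char) ch =>
          if pvAIsAlpha ch then (st.1, st.2 ++ [ch])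
          else if st.2 ≠ [] then (st.1 ++ [String.ofList st.2], []) else st)
        (out, cur))
      = (cs.foldl
        (fun (st : List String × List Char) ch =>
          if pvAIsAlpha ch then (st.1, st.2 ++ [ch])
          else if st.2 ≠ [] then (st.1 ++ [String.ofList st.2], []) else st)
        (if pvAIsAlpha c then (out, cur ++ [c])
         else if cur ≠ [] then (out ++ [String.ofList cur], []) else (out, cur)))
      from by rw [List.foldl_cons]]
    by_cases h : pvBIsAlpha c
    · have ha : pvAIsAlpha c = true := by rw [pvIsAlpha_eq]; exact h
      rw [show (if pvAIsAlpha c then (out, cur ++ [c])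
           else if cur ≠ [] then (out ++ [String.ofList cur], []) else (out, cur))
          = (out, cur ++ [c]) from by rw [if_pos ha], ih]
      by_cases hc : cur = []
      · simp [hc, pvFindAlphaRuns, h, List.takeWhile_cons, List.dropWhile_cons]
      · have hne : cur ++ [c] ≠ [] := by simp
        simp [hc, hne, List.takeWhile_cons, List.dropWhile_cons, h]
    · have ha : pvAIsAlpha c = false := by rw [pvIsAlpha_eq]; simpa using h
      by_cases hc : cur = []
      · rw [show (if pvAIsAlpha c then (out, cur ++ [c])
             else if cur ≠ [] then (out ++ [String.ofList cur], []) else (out, cur))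
            = (out, cur) from by simp [ha, hc], ih]
        simp [hc, pvFindAlphaRuns, h]
      · rw [show (if pvAIsAlpha c then (out, cur ++ [c])
             else if cur ≠ [] then (out ++ [String.ofList cur], []) else (out, cur))
            = (out ++ [String.ofList cur], []) from by simp [ha, hc], ih]
        simp [hc, pvFindAlphaRuns, h, List.takeWhile_cons, List.dropWhile_cons]

-- ===== VERDICT (by name: the statement is the Claim_ definition above) =====
theorem tokenize_alpha_preserve_spec : Claim_equal_tokenize_alpha_preserve := by
  intro text _
  unfold Spec_tokenize_alpha_preserve tokenize_alpha_preserve tokenize_alpha_preserve_alt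
  by_cases h : text = ""
  · simp [h]
  · simpa [h] using pvLoop_eq text.toList [] []
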